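-- pv_equiv track=rewrite | github.com/sei-international/leap-weap-integration | utils/leap_weap.py | split_interp_ex
-- ===== SOURCE A (Python) =====
-- def split_interp_ex(exp, startyear, endyear, listseparator):
--     """Extract and return from Interp expression expression the part before the startyear and the part after the endyear
--
--     Input arguments:
--         exp is an Interp expression
--         startyear, endyear are integers
--         listseparator is the currently active Windows list separator character (e.g., "," or ";")
--     Returns: A list of the form [before_startyear_expression, after_endyear_expression]
--     """
--     return_val = []
--     return_val.append("Interp(")
--     return_val.append("")
--     interp_termination = exp[-(len(exp) - exp.find(")") ):len(exp)]  # Closing ) and any subsequent content in Interp expression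
--     exp = exp.lower().replace("interp(", "")
--     exp = exp[0:exp.find(")")]
--     exp_split = exp.split(listseparator)
--     for i in range(0, len(exp_split),2):
--         if i == len(exp_split)-1:
--             # exp_split[i] is final, optional growth rate parameter for Interp
--             return_val[1] = "".join([return_val[1], exp_split[-1].strip()])
--             break
--         if int(exp_split[i].strip())<startyear :
--             return_val[0] = "".join([return_val[0], exp_split[i].strip(), listseparator, exp_split[i+1].strip(), listseparator])
--         if int(exp_split[i].strip())>endyear :
--             return_val[1] = "".join([return_val[1], exp_split[i].strip(), listseparator, exp_split[i+1].strip(), listseparator])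
--     # Trim extra list separators
--     if return_val[0][-1] == listseparator: return_val[0] = return_val[0][0:-1]
--     if len(return_val[1])>0:
--         if return_val[1][-1] == listseparator:
--             return_val[1] = return_val[1][0:-1]
--             return_val[1] = "".join([return_val[1], interp_termination])
--         else:
--             return_val[1] = "".join([return_val[1], interp_termination])
--     else:
--         return_val[1] = "".join([return_val[1], interp_termination])
--     return return_val
-- ===== SOURCE B (Python) =====
-- def _chop(s, sep):
--     # drop the final character when it equals the list separator
--     return s[:-1] if s[-1:] == sep else s
--
--
-- def _records(tokens, sep):
--     # Parse stage: recursively turn the token list into one (year, rendered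
--     # "year<sep>value<sep>" chunk) record per consecutive pair, plus the
--     # leftover optional growth-rate token.
--     if len(tokens) < 2:
--         return [], (tokens[0] if tokens else "")
--     recs, growth = _records(tokens[2:], sep)
--     return [(int(tokens[0]), tokens[0] + sep + tokens[1] + sep)] + recs, growth
--
--
-- def split_interp_ex(exp, startyear, endyear, listseparator):
--     close = exp.find(")")
--     termination = exp if close < 0 else exp[close:]
--     body = exp.lower().replace("interp(", "")
--     body = body[:body.find(")")]
--     tokens = [t.strip() for t in body.split(listseparator)]
--     records, growth = _records(tokens, listseparator)
--     before = "".join(c for y, c in records if y < startyear)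
--     after = "".join(c for y, c in records if y > endyear)
--     return ["Interp(" + _chop(before, listseparator),
--             _chop(after + growth, listseparator) + termination]
-- ===== Notes on version B (the rewrite author's own statement) =====
-- stated objective: alternative
-- what changed: B replaces A's fused stride-2 index loop with its in-loop break and three trailing-separator trim branches by a parse/render split: a recursive parse stage turns the token list into (year, rendered chunk) records plus the leftover growth token, each part is then a filter plus one join over the precomputed chunks, and a single generic chop helper handles the trailing separator; it trades the fused loop for staged passes at the same cost.
-- outside the precondition, e.g. on split_interp_ex(') ', 20, 10, '('): A returns ['Interp', ') '], B returns ['Interp(', ') ']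
import Mathlib
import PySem

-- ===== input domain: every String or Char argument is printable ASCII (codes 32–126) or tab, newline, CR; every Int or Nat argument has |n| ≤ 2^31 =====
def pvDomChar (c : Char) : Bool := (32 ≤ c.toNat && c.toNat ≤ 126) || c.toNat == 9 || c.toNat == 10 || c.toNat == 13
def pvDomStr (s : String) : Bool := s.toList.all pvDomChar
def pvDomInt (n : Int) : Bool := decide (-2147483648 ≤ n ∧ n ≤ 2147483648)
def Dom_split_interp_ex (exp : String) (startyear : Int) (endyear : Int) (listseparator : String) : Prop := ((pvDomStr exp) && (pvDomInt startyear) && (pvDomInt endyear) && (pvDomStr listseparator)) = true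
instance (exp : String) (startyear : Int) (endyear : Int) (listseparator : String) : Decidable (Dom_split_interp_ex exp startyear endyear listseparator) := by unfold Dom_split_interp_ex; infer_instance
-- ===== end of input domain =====

-- B replaces A's fused stride-2 index loop (in-loop break, both result strings grown
-- in place, three trailing-separator trim branches) by a parse/render split: a
-- recursive parse stage yields (year, rendered chunk) records plus the leftover
-- growth token, each part is a filter + one join over those records, and one generic
-- chop helper trims (objective: alternative; same return value wherever A returns
-- inside Pre_).

-- ===== PORT A =====
-- the for-loop over range(0, len(exp_split), 2) with its break, as recursion on i
def aLoop (xs : List (List Char)) (sepL : List Char) (sy ey : Int) (i : Nat) (r0 r1 : List Char) : List Char × List Char :=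
  if _h : i < xs.length then
    if i = xs.length - 1 then
      -- exp_split[i] is the final, optional growth rate parameter
      (r0, r1 ++ PySem.Chars.strip ((PySem.List.pyGet? xs (-1)).getD []))
    else
      let y := PySem.Chars.strip ((PySem.List.pyGet? xs (i : Int)).getD [])
      let v := PySem.Chars.strip ((PySem.List.pyGet? xs ((i : Int) + 1)).getD [])
      -- int() may raise ValueError in Python: Pre_ admits only parsing year tokens
      let r0' := if (PySem.Int.ofChars? y).getD 0 < sy then r0 ++ y ++ sepL ++ v ++ sepL else r0
      let r1' := if (PySem.Int.ofChars? y).getD 0 > ey then r1 ++ y ++ sepL ++ v ++ sepL else r1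
      aLoop xs sepL sy ey (i + 2) r0' r1'
  else (r0, r1)
termination_by xs.length - i
decreasing_by omega

def split_interp_ex (exp : String) (startyear : Int) (endyear : Int) (listseparator : String) : List String :=
  let e := exp.toList
  let sepL := listseparator.toList
  -- exp[-(len(exp) - exp.find(")")):len(exp)]
  let term := PySem.List.slice e (some (-((e.length : Int) - PySem.Chars.find e [')']))) (some (e.length : Int))
  let e1 := PySem.Chars.replace (PySem.Chars.lower e) "interp(".toList []
  let e2 := PySem.List.slice e1 (some 0) (some (PySem.Chars.find e1 [')']))
  let xs := (PySem.Chars.split? e2 sepL).getD []   -- raises on empty separator: Pre_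
  let pr := aLoop xs sepL startyear endyear 0 "Interp(".toList []
  let r0 := if (PySem.List.pyGet? pr.1 (-1)).map (fun c => [c]) = some sepL
            then PySem.List.slice pr.1 (some 0) (some (-1)) else pr.1
  let r1 := if pr.2.length > 0 then
              (if (PySem.List.pyGet? pr.2 (-1)).map (fun c => [c]) = some sepL
               then PySem.List.slice pr.2 (some 0) (some (-1)) ++ term else pr.2 ++ term)
            else pr.2 ++ term
  [String.ofList r0, String.ofList r1]

-- ===== PORT B =====
-- _chop: s[:-1] if s[-1:] == sep else s
def bChop (s sepL : List Char) : List Char :=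
  if PySem.List.slice s (some (-1)) none = sepL then PySem.List.slice s none (some (-1)) else s

-- _records: recursively turn the token list into (year, rendered chunk) records
-- plus the leftover optional growth-rate token
def bRecords : List (List Char) → List Char → List (Int × List Char) × List Char
  | y :: v :: r, sepL =>
      let p := bRecords r sepL
      (((PySem.Int.ofChars? y).getD 0, y ++ sepL ++ v ++ sepL) :: p.1, p.2)
  | [g], _ => ([], g)
  | [], _ => ([], [])

def split_interp_ex_alt (exp : String) (startyear : Int) (endyear : Int) (listseparator : String) : List String :=
  let e := exp.toList
  let sepL := listseparator.toList
  let close := PySem.Chars.find e [')']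
  let term := if close < 0 then e else PySem.List.slice e (some close) none
  let body0 := PySem.Chars.replace (PySem.Chars.lower e) "interp(".toList []
  let body := PySem.List.slice body0 none (some (PySem.Chars.find body0 [')']))
  let tokens := ((PySem.Chars.split? body sepL).getD []).map PySem.Chars.strip
  let rg := bRecords tokens sepL
  -- "".join(c for y, c in records if …)
  let before := (((rg.1.filter (fun yc => yc.1 < startyear)).map (fun yc => yc.2))).flatten
  let after := (((rg.1.filter (fun yc => yc.1 > endyear)).map (fun yc => yc.2))).flatten
  [String.ofList ("Interp(".toList ++ bChop before sepL),
   String.ofList (bChop (after ++ rg.2) sepL ++ term)]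

-- ===== PRECONDITION & SPEC =====
-- the token list both Pythons split the cleaned expression into (shape helper for Pre_ only)
def pvRawTokens (exp listseparator : String) : List (List Char) :=
  let b0 := PySem.Chars.replace (PySem.Chars.lower exp.toList) "interp(".toList []
  let body := PySem.List.slice b0 (some 0) (some (PySem.Chars.find b0 [')']))
  (PySem.Chars.split? body listseparator.toList).getD []

-- every year token (first of each consecutive pair) must parse as a Python int
def pvYearsOK : List (List Char) → Bool
  | y :: _ :: r => (PySem.Int.ofChars? (PySem.Chars.strip y)).isSome && pvYearsOK r
  | _ => true

-- Pre_ excludes the inputs where A raises ValueError (an empty separator, year tokens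
-- int() rejects) and the separator "(": there A's trailing-separator trim can clip the
-- "Interp(" prefix itself when no pair falls before startyear, a defensible-corner
-- artefact B does not reproduce.
def Pre_split_interp_ex (exp : String) (startyear : Int) (endyear : Int) (listseparator : String) : Prop :=
  listseparator ≠ "" ∧ listseparator ≠ "(" ∧ pvYearsOK (pvRawTokens exp listseparator) = true
instance (exp : String) (startyear : Int) (endyear : Int) (listseparator : String) : Decidable (Pre_split_interp_ex exp startyear endyear listseparator) := by unfold Pre_split_interp_ex; infer_instance

def pvWitness_split_interp_ex : String × Int × Int × String := ("Interp(2000, 5, 2020, 7)", 2010, 2010, ",")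

def Spec_split_interp_ex (exp : String) (startyear : Int) (endyear : Int) (listseparator : String) (out : List String) : Prop := out = split_interp_ex_alt exp startyear endyear listseparator
instance (exp : String) (startyear : Int) (endyear : Int) (listseparator : String) (out : List String) : Decidable (Spec_split_interp_ex exp startyear endyear listseparator out) := by unfold Spec_split_interp_ex; infer_instance

-- ===== CLAIM (what is proved, stated in full; the proofs are below) =====
def Claim_equal_split_interp_ex : Prop := ∀ (exp : String) (startyear : Int) (endyear : Int) (listseparator : String), Dom_split_interp_ex exp startyear endyear listseparator → Pre_split_interp_ex exp startyear endyear listseparator → Spec_split_interp_ex exp startyear endyear listseparator (split_interp_ex exp startyear endyear listseparator)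

-- ===== LEMMAS AND PROOFS =====

-- A's selected "year,value," chunks, concatenated directly over the raw token list
def bcat (sepL : List Char) (cmp : Int → Bool) : List (List Char) → List Char
  | y :: v :: r =>
      (if cmp ((PySem.Int.ofChars? (PySem.Chars.strip y)).getD 0)
       then PySem.Chars.strip y ++ sepL ++ PySem.Chars.strip v ++ sepL else []) ++ bcat sepL cmp r
  | _ => []

-- the leftover odd token (stripped), if any
def gtake : List (List Char) → List Char
  | _ :: _ :: r => gtake r
  | [g] => PySem.Chars.strip g
  | [] => []

lemma aLoop_eq (xs : List (List Char)) (sepL : List Char) (sy ey : Int) :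
    ∀ i r0 r1, aLoop xs sepL sy ey i r0 r1 =
      (r0 ++ bcat sepL (fun n => n < sy) (xs.drop i),
       r1 ++ bcat sepL (fun n => n > ey) (xs.drop i) ++ gtake (xs.drop i)) := by
  have main : ∀ n i r0 r1, xs.length - i ≤ n → aLoop xs sepL sy ey i r0 r1 =
      (r0 ++ bcat sepL (fun n => n < sy) (xs.drop i),
       r1 ++ bcat sepL (fun n => n > ey) (xs.drop i) ++ gtake (xs.drop i)) := by
    intro n
    induction n with
    | zero =>
      intro i r0 r1 h
      rw [aLoop, dif_neg (by omega), List.drop_eq_nil_of_le (by omega)]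
      simp [bcat, gtake]
    | succ n ih =>
      intro i r0 r1 h
      rw [aLoop]
      by_cases hi : i < xs.length
      · rw [dif_pos hi]
        by_cases hlast : i = xs.length - 1
        · rw [if_pos hlast]
          have hne : xs ≠ [] := by intro hnil; rw [hnil] at hi; simp at hi
          have hdrop : xs.drop i = [xs.getLast hne] := by
            subst hlast
            rw [List.getLast_eq_getElem, List.drop_eq_getElem_cons (by omega),
                List.drop_eq_nil_of_le (by omega)]
          rw [hdrop, PySem.List.pyGet?_neg_one, List.getLast?_eq_some_getLast hne]
          simp [bcat, gtake]
        · rw [if_neg hlast]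
          have hi1 : i + 1 < xs.length := by omega
          have hdrop : xs.drop i = xs[i] :: xs[i+1] :: xs.drop (i+2) := by
            rw [List.drop_eq_getElem_cons hi, List.drop_eq_getElem_cons hi1]
          have hg0 : PySem.List.pyGet? xs (i : Int) = some xs[i] := by
            rw [PySem.List.pyGet?_natCast, List.getElem?_eq_getElem hi]
          have hg1 : PySem.List.pyGet? xs ((i : Int) + 1) = some xs[i+1] := by
            have hc : ((i : Int) + 1) = ((i + 1 : Nat) : Int) := by push_cast; ring
            rw [hc, PySem.List.pyGet?_natCast, List.getElem?_eq_getElem hi1]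
          simp only [hg0, hg1, Option.getD_some]
          rw [ih (i + 2) _ _ (by omega), hdrop]
          simp only [bcat, gtake]
          rw [Prod.mk.injEq]
          constructor
          · by_cases hc : (PySem.Int.ofChars? (PySem.Chars.strip xs[i])).getD 0 < sy <;>
              simp [hc, List.append_assoc]
          · by_cases hc : (PySem.Int.ofChars? (PySem.Chars.strip xs[i])).getD 0 > ey <;>
              simp [hc, List.append_assoc]
      · rw [dif_neg hi, List.drop_eq_nil_of_le (by omega)]
        simp [bcat, gtake]
  intro i r0 r1
  exact main (xs.length - i) i r0 r1 le_rfl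

-- A's convoluted termination slice = B's plain conditional tail slice
lemma term_eq (e : List Char) :
    PySem.List.slice e (some (-((e.length : Int) - PySem.Chars.find e [')']))) (some (e.length : Int)) =
      (if PySem.Chars.find e [')'] < 0 then e
       else PySem.List.slice e (some (PySem.Chars.find e [')'])) none) := by
  have h1 := PySem.Chars.neg_one_le_find e [')']
  have h2 := PySem.Chars.find_le_length e [')']
  split_ifs with h0
  · have hm1 : PySem.Chars.find e [')'] = -1 := by omega
    rw [hm1]
    simp only [PySem.List.slice, PySem.List.clampIdx]
    split_ifs
    all_goals first
      | (exfalso; omega)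
      | (rw [List.take_of_length_le (by simp; try omega)];
         first | rfl | simp only [List.drop_zero] | (congr 1; omega))
  · have h0' : 0 ≤ PySem.Chars.find e [')'] := by omega
    have hlt : PySem.Chars.find e [')'] < (e.length : Int) := by
      have hs := (PySem.Chars.find_spec h0').1
      rcases lt_or_ge (PySem.Chars.find e [')']) (e.length : Int) with h | h
      · exact h
      · rw [List.drop_eq_nil_of_le (by omega)] at hs
        exact absurd (List.prefix_nil.mp hs) (by simp)
    rw [PySem.List.slice_from e h0']
    simp only [PySem.List.slice, PySem.List.clampIdx]
    split_ifs
    all_goals first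
      | (exfalso; omega)
      | (rw [List.take_of_length_le (by simp; try omega)]; first | rfl | (congr 1; omega))

lemma slice_zero_neg_one {α : Type} (xs : List α) :
    PySem.List.slice xs (some 0) (some (-1)) = xs.dropLast := by
  rw [PySem.List.slice_zero_start]
  simp only [PySem.List.slice, PySem.List.clampIdx, List.dropLast_eq_take, List.drop_zero]
  split_ifs with h1 h2
  · have : xs.length = 0 := by omega
    simp [this]
  · congr 1; omega
  · omega

lemma slice_none_neg_one {α : Type} (xs : List α) :
    PySem.List.slice xs none (some (-1)) = xs.dropLast := by
  rw [← PySem.List.slice_zero_start]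
  exact slice_zero_neg_one xs

-- s[-1:] is the singleton of the last element (or [] when s is empty)
lemma slice_last_concat {α : Type} (xs : List α) (x : α) :
    PySem.List.slice (xs ++ [x]) (some (-1)) none = [x] := by
  rw [PySem.List.slice_from_neg_one]
  simp

-- the records' selected chunks, flattened, are A's accumulated chunk string
lemma recFlat_eq (sepL : List Char) (cmp : Int → Bool) (raw : List (List Char)) :
    ((((bRecords (raw.map PySem.Chars.strip) sepL).1.filter (fun yc => cmp yc.1)).map
        (fun yc => yc.2))).flatten = bcat sepL cmp raw := by
  induction raw using gtake.induct with
  | case1 y v r ih =>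
    simp only [List.map_cons, bRecords, bcat]
    by_cases hc : cmp ((PySem.Int.ofChars? (PySem.Chars.strip y)).getD 0) <;>
      simp [hc, ih]
  | case2 g => simp [bRecords, bcat]
  | case3 => simp [bRecords, bcat]

-- the records' leftover token is A's stripped growth-rate token
lemma recSnd_eq (sepL : List Char) (raw : List (List Char)) :
    (bRecords (raw.map PySem.Chars.strip) sepL).2 = gtake raw := by
  induction raw using gtake.induct with
  | case1 y v r ih => simpa [bRecords, gtake] using ih
  | case2 g => simp [bRecords, gtake]
  | case3 => simp [bRecords, gtake]

lemma recFlat_lt (sepL : List Char) (sy : Int) (raw : List (List Char)) :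
    ((((bRecords (raw.map PySem.Chars.strip) sepL).1.filter (fun yc => yc.1 < sy)).map
        (fun yc => yc.2))).flatten = bcat sepL (fun n => n < sy) raw :=
  recFlat_eq sepL (fun n => n < sy) raw

lemma recFlat_gt (sepL : List Char) (ey : Int) (raw : List (List Char)) :
    ((((bRecords (raw.map PySem.Chars.strip) sepL).1.filter (fun yc => yc.1 > ey)).map
        (fun yc => yc.2))).flatten = bcat sepL (fun n => n > ey) raw :=
  recFlat_eq sepL (fun n => n > ey) raw

-- A's whole-string trim of "Interp(" + before = the prefix + B's chop of before
-- (needs sep ≠ "" and sep ≠ "(")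
lemma chop_before (sepL : List Char) (hne : sepL ≠ []) (hpar : sepL ≠ ['(']) (s : List Char) :
    (if (PySem.List.pyGet? ("Interp(".toList ++ s) (-1)).map (fun ch => [ch]) = some sepL
     then PySem.List.slice ("Interp(".toList ++ s) (some 0) (some (-1))
     else "Interp(".toList ++ s)
    = "Interp(".toList ++ bChop s sepL := by
  rcases s.eq_nil_or_concat with rfl | ⟨xs, x, rfl⟩
  · rw [if_neg, bChop, if_neg]
    · rw [PySem.List.slice, PySem.List.clampIdx]
      simp [Ne.symm hne]
    · simp only [List.append_nil, PySem.List.pyGet?_neg_one]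
      have : ("Interp(".toList).getLast? = some '(' := by decide
      rw [this]
      simp only [Option.map_some, Option.some.injEq]
      exact fun h => hpar (h.symm)
  · simp only [List.concat_eq_append]
    rw [bChop, slice_last_concat, slice_none_neg_one]
    rw [← List.append_assoc, PySem.List.pyGet?_neg_one, List.getLast?_concat]
    simp only [Option.map_some, Option.some.injEq]
    by_cases hx : [x] = sepL
    · rw [if_pos hx, if_pos hx, slice_zero_neg_one, List.dropLast_concat, List.dropLast_concat]
    · rw [if_neg hx, if_neg hx, List.append_assoc]

-- A's length-guarded trim-and-terminate ladder = B's chop followed by the termination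
lemma chop_ladder (sepL : List Char) (hne : sepL ≠ []) (r1 term : List Char) :
    (if r1.length > 0 then
       (if (PySem.List.pyGet? r1 (-1)).map (fun ch => [ch]) = some sepL
        then PySem.List.slice r1 (some 0) (some (-1)) ++ term else r1 ++ term)
     else r1 ++ term)
    = bChop r1 sepL ++ term := by
  rcases r1.eq_nil_or_concat with rfl | ⟨xs, x, rfl⟩
  · rw [if_neg (by simp), bChop, if_neg]
    rw [PySem.List.slice, PySem.List.clampIdx]
    simp [Ne.symm hne]
  · simp only [List.concat_eq_append]
    rw [if_pos (by simp), bChop, slice_last_concat, slice_none_neg_one]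
    rw [PySem.List.pyGet?_neg_one, List.getLast?_concat]
    simp only [Option.map_some, Option.some.injEq]
    by_cases hx : [x] = sepL
    · rw [if_pos hx, if_pos hx, slice_zero_neg_one]
    · rw [if_neg hx, if_neg hx]

-- ===== VERDICT (by name: the statement is the Claim_ definition above) =====
theorem split_interp_ex_spec : Claim_equal_split_interp_ex := by
  intro exp sy ey sep _dom pre
  unfold Spec_split_interp_ex
  obtain ⟨hsep, hpar, _hyears⟩ := pre
  have hne : sep.toList ≠ [] := by
    intro h
    exact hsep (by simpa using congrArg String.ofList h)
  have hp2 : sep.toList ≠ ['('] := by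
    intro h
    exact hpar (by simpa using congrArg String.ofList h)
  simp only [split_interp_ex, split_interp_ex_alt]
  rw [aLoop_eq, List.drop_zero, term_eq, PySem.List.slice_zero_start]
  dsimp only
  simp only [List.nil_append]
  rw [recFlat_lt, recFlat_gt, recSnd_eq]
  rw [chop_before _ hne hp2, chop_ladder _ hne]
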